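-- pv_equiv track=rewrite | github.com/popgengui/agestrucnb | agestrucne/asnviz/LineRegress.py | _getSubpopLimit
-- ===== SOURCE A (Python) =====
-- def _getSubpopLimit(table,itemList=None):
--     identTuples = list(table.keys())
--     maxDict = {}
--     for ident in identTuples:
--         if not itemList or ident in itemList:
--             if ident[0] not in maxDict:
--                 maxDict[ident[0]] = 0
--             maxDict[ident[0]] = max(maxDict[ident[0]],ident[1])
--     return maxDict
-- ===== SOURCE B (Python) =====
-- def _getSubpopLimit(table, itemList=None):
--     kept = [ident for ident in table.keys() if not itemList or ident in itemList]
--     groups = {}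
--     for ident in kept:
--         groups.setdefault(ident[0], []).append(ident[1])
--     return {key: max([0] + vals) for key, vals in groups.items()}
-- ===== Notes on version B (the rewrite author's own statement) =====
-- stated objective: alternative
-- what changed: Replaces A's single accumulating pass that keeps a running max per key with a filter of the kept keys, a grouping pass that collects each key's second components into a list, and a dict comprehension taking each group's zero-floored max.
import Mathlib
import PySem

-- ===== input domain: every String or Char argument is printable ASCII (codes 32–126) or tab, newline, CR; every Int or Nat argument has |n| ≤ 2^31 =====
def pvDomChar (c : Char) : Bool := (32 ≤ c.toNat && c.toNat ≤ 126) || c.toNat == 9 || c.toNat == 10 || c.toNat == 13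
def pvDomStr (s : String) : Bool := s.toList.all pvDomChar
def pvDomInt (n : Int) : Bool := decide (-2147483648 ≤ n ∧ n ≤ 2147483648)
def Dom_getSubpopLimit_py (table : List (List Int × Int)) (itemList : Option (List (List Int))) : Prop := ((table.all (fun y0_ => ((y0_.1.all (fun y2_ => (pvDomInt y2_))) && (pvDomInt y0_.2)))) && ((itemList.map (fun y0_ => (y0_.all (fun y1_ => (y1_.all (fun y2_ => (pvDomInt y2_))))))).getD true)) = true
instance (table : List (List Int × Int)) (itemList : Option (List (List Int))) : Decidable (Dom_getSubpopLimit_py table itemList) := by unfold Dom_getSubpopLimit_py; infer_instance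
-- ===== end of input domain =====

-- B replaces A's accumulating running-max pass with filter, group the second components into lists
-- keyed by the first, then take each group's zero-floored max (alternative decomposition; not faster).

-- ===== PORT A =====
-- 'not itemList or ident in itemList' (None and [] are falsy); used verbatim by both Pythons
def pvKeep (itemList : Option (List (List Int))) (ident : List Int) : Bool :=
  match itemList with
  | none => true
  | some l => l.isEmpty || l.contains ident

-- ident[i] for i = 0, 1; exact under Pre_ (Raise.InRange guaranteed by Pre_getSubpopLimit_py)
def pvAt (ident : List Int) (i : Int) : Int := PySem.List.pyGetD ident i 0

def getSubpopLimit_py (table : List (List Int × Int)) (itemList : Option (List (List Int))) : List (Int × Int) :=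
  let identTuples := (PySem.Dict.ofList table).keys
  let maxDict := identTuples.foldl (fun maxDict ident =>
    if pvKeep itemList ident then
      let d := if maxDict.contains (pvAt ident 0) then maxDict
               else maxDict.insert (pvAt ident 0) 0
      d.insert (pvAt ident 0) (max (d.getD (pvAt ident 0) 0) (pvAt ident 1))
    else maxDict) PySem.Dict.empty
  maxDict.items

-- ===== PORT B =====
-- max([0] + vals)
def pvZeroMax (vals : List Int) : Int :=
  (PySem.List.max? ((0 : Int) :: vals) (fun y => y)).getD 0

def getSubpopLimit_py_alt (table : List (List Int × Int)) (itemList : Option (List (List Int))) : List (Int × Int) :=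
  let kept := ((PySem.Dict.ofList table).keys).filter (pvKeep itemList)
  -- groups.setdefault(ident[0], []).append(ident[1])  ==  groups[k] = groups.get(k, []) + [v]
  let groups := kept.foldl
    (fun g ident => g.modify (pvAt ident 0) [] (· ++ [pvAt ident 1]))
    (PySem.Dict.empty : PySem.Dict Int (List Int))
  -- {key: max([0] + vals) for key, vals in groups.items()}
  let res := groups.items.foldl (fun d p => d.insert p.1 (pvZeroMax p.2)) PySem.Dict.empty
  res.items

-- ===== PRECONDITION & SPEC =====
-- Pre_ excludes exactly the inputs where Python A raises IndexError: a dict key that passes the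
-- itemList filter but has fewer than 2 elements (ident[0] / ident[1] out of range).
def Pre_getSubpopLimit_py (table : List (List Int × Int)) (itemList : Option (List (List Int))) : Prop :=
  ∀ p ∈ table, pvKeep itemList p.1 = true → 2 ≤ p.1.length
instance (table : List (List Int × Int)) (itemList : Option (List (List Int))) : Decidable (Pre_getSubpopLimit_py table itemList) := by unfold Pre_getSubpopLimit_py; infer_instance
def pvWitness_getSubpopLimit_py : (List (List Int × Int)) × Option (List (List Int)) := ([([1, 2], 5), ([1, 7], 3)], none)

def Spec_getSubpopLimit_py (table : List (List Int × Int)) (itemList : Option (List (List Int))) (out : List (Int × Int)) : Prop := out = getSubpopLimit_py_alt table itemList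
instance (table : List (List Int × Int)) (itemList : Option (List (List Int))) (out : List (Int × Int)) : Decidable (Spec_getSubpopLimit_py table itemList out) := by unfold Spec_getSubpopLimit_py; infer_instance

-- ===== CLAIM (what is proved, stated in full; the proofs are below) =====
def Claim_equal_getSubpopLimit_py : Prop := ∀ (table : List (List Int × Int)) (itemList : Option (List (List Int))), Dom_getSubpopLimit_py table itemList → Pre_getSubpopLimit_py table itemList → Spec_getSubpopLimit_py table itemList (getSubpopLimit_py table itemList)

-- ===== LEMMAS AND PROOFS =====

-- A's body on a kept key collapses to a single overwrite with the running max
theorem pv_stepA (d : PySem.Dict Int Int) (c v : Int) :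
    (let e := if d.contains c then d else d.insert c 0
     e.insert c (max (e.getD c 0) v)) = d.insert c (max (d.getD c 0) v) := by
  by_cases h : d.contains c = true
  · simp [h]
  · have h' : d.contains c = false := by simpa using h
    simp only [h', Bool.false_eq_true, if_false]
    rw [PySem.Dict.getD_insert_self, PySem.Dict.insert_insert_self]
    have h0 : d.getD c 0 = 0 := PySem.Dict.getD_of_not_contains d 0 h'
    rw [h0]

-- value of A's running-max fold at a fixed key
theorem pv_getD_foldA (l : List (List Int)) (d : PySem.Dict Int Int) (c : Int) :
    (l.foldl (fun d x => d.insert (pvAt x 0) (max (d.getD (pvAt x 0) 0) (pvAt x 1))) d).getD c 0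
      = ((l.filter (fun x => pvAt x 0 == c)).map (fun x => pvAt x 1)).foldl max (d.getD c 0) := by
  induction l generalizing d with
  | nil => rfl
  | cons x t ih =>
    simp only [List.foldl_cons, List.filter_cons]
    by_cases h : pvAt x 0 = c
    · rw [ih]
      simp [h, PySem.Dict.getD_insert_self]
    · rw [ih]
      have hb : (pvAt x 0 == c) = false := beq_eq_false_iff_ne.mpr h
      rw [PySem.Dict.getD_insert_of_ne d _ _ (Ne.symm h)]
      simp [hb]

-- value of B's grouping fold at a fixed key
theorem pv_getD_groups (l : List (List Int)) (g : PySem.Dict Int (List Int)) (c : Int) :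
    (l.foldl (fun g x => g.modify (pvAt x 0) [] (· ++ [pvAt x 1])) g).getD c []
      = g.getD c [] ++ (l.filter (fun x => pvAt x 0 == c)).map (fun x => pvAt x 1) := by
  induction l generalizing g with
  | nil => simp
  | cons x t ih =>
    simp only [List.foldl_cons, List.filter_cons]
    rw [ih, PySem.Dict.getD_modify]
    by_cases h : pvAt x 0 = c
    · simp [h]
    · have hb : (pvAt x 0 == c) = false := beq_eq_false_iff_ne.mpr h
      rw [if_neg (fun e => h (Eq.symm e))]
      simp [hb]

theorem pv_items_aux {ν : Type} (l : List (Int × ν)) (v0 : ν) (h : (l.map Prod.fst).Nodup) :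
    l = (l.map Prod.fst).map (fun k => (k, (PySem.Dict.mk l).getD k v0)) := by
  induction l with
  | nil => rfl
  | cons p rest ih =>
    obtain ⟨k, v⟩ := p
    simp only [List.map_cons, List.nodup_cons] at h ⊢
    refine List.cons_eq_cons.mpr ⟨?_, ?_⟩
    · simp [PySem.Dict.getD_eq_get?_getD, PySem.Dict.get?_mk_cons]
    · calc rest = (rest.map Prod.fst).map (fun c => (c, (PySem.Dict.mk rest).getD c v0)) := ih h.2
        _ = (rest.map Prod.fst).map (fun c => (c, (PySem.Dict.mk ((k, v) :: rest)).getD c v0)) := by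
            apply List.map_congr_left
            intro c hc
            have hne : (k == c) = false :=
              beq_eq_false_iff_ne.mpr (fun e => h.1 (e ▸ hc))
            simp [PySem.Dict.getD_eq_get?_getD, PySem.Dict.get?_mk_cons, hne]

-- a Dict with Nodup keys is determined by its key list and its getD values
theorem pv_items_eq {ν : Type} (d : PySem.Dict Int ν) (v0 : ν) (h : d.keys.Nodup) :
    d.items = d.keys.map (fun k => (k, d.getD k v0)) := by
  cases d with
  | mk l => simpa [PySem.Dict.keys_mk] using pv_items_aux l v0 (by simpa [PySem.Dict.keys_mk] using h)

-- max([0] + vals) is the running max of vals started at 0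
theorem pv_zeroMax_eq (vals : List Int) : pvZeroMax vals = vals.foldl max 0 := by
  simp [pvZeroMax, PySem.List.max?_id_cons]

-- ===== VERDICT (by name: the statement is the Claim_ definition above) =====
theorem getSubpopLimit_py_spec : Claim_equal_getSubpopLimit_py := by
  intro table itemList _ _
  unfold Spec_getSubpopLimit_py getSubpopLimit_py getSubpopLimit_py_alt
  show (((PySem.Dict.ofList table).keys).foldl (fun maxDict ident =>
      if pvKeep itemList ident then
        let d := if maxDict.contains (pvAt ident 0) then maxDict
                 else maxDict.insert (pvAt ident 0) 0
        d.insert (pvAt ident 0) (max (d.getD (pvAt ident 0) 0) (pvAt ident 1))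
      else maxDict) PySem.Dict.empty).items
    = (((((PySem.Dict.ofList table).keys).filter (pvKeep itemList)).foldl
          (fun g ident => g.modify (pvAt ident 0) [] (· ++ [pvAt ident 1]))
          (PySem.Dict.empty : PySem.Dict Int (List Int))).items.foldl
        (fun d p => d.insert p.1 (pvZeroMax p.2)) PySem.Dict.empty).items
  rw [← List.foldl_filter]
  set kept := ((PySem.Dict.ofList table).keys).filter (pvKeep itemList) with hkept
  -- A: collapse the two-step body to a single overwrite
  have hfA : (fun (maxDict : PySem.Dict Int Int) (ident : List Int) =>
        let d := if maxDict.contains (pvAt ident 0) then maxDict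
                 else maxDict.insert (pvAt ident 0) 0
        d.insert (pvAt ident 0) (max (d.getD (pvAt ident 0) 0) (pvAt ident 1)))
      = (fun d x => d.insert (pvAt x 0) (max (d.getD (pvAt x 0) 0) (pvAt x 1))) :=
    funext fun d => funext fun x => pv_stepA d (pvAt x 0) (pvAt x 1)
  rw [hfA]
  set dA := kept.foldl (fun d x => d.insert (pvAt x 0) (max (d.getD (pvAt x 0) 0) (pvAt x 1)))
      PySem.Dict.empty with hdA
  set groups := kept.foldl (fun g x => g.modify (pvAt x 0) [] (· ++ [pvAt x 1]))
      (PySem.Dict.empty : PySem.Dict Int (List Int)) with hgroups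
  -- key lists coincide (both are the ordered dedup of the kept first components)
  have hKA : dA.keys = PySem.Set.update [] (kept.map (fun x => pvAt x 0)) := by
    rw [hdA, PySem.Dict.keys_foldl_insert_key kept (fun x => pvAt x 0)
      (fun d x => max (d.getD (pvAt x 0) 0) (pvAt x 1)) PySem.Dict.empty, PySem.Dict.keys_empty]
  have hKG : groups.keys = PySem.Set.update [] (kept.map (fun x => pvAt x 0)) := by
    rw [hgroups, PySem.Dict.keys_foldl_modify_key kept (fun x => pvAt x 0) []
      (fun _ x => (· ++ [pvAt x 1])) PySem.Dict.empty, PySem.Dict.keys_empty]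
  have hnA : dA.keys.Nodup := PySem.Dict.nodup_keys_foldl_insert_key kept (fun x => pvAt x 0)
      (fun d x => max (d.getD (pvAt x 0) 0) (pvAt x 1)) PySem.Dict.empty PySem.Dict.nodup_keys_empty
  have hnG : groups.keys.Nodup := PySem.Dict.nodup_keys_foldl_modify_key kept (fun x => pvAt x 0) []
      (fun _ x => (· ++ [pvAt x 1])) PySem.Dict.empty PySem.Dict.nodup_keys_empty
  -- B: a comprehension over the (distinct-keyed) group items is a map
  have hres : ((groups.items.foldl (fun d p => d.insert p.1 (pvZeroMax p.2))
        PySem.Dict.empty).items : List (Int × Int))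
      = groups.items.map (fun p => (p.1, pvZeroMax p.2)) := by
    rw [PySem.Dict.items_foldl_insert_fresh groups.items Prod.fst (fun p => pvZeroMax p.2)
        PySem.Dict.empty (fun a _ => PySem.Dict.contains_empty a.1) hnG]
    rw [show (PySem.Dict.empty : PySem.Dict Int Int).items = [] from rfl, List.nil_append]
  rw [hres, pv_items_eq groups [] hnG, pv_items_eq dA 0 hnA, List.map_map, hKA, hKG]
  apply List.map_congr_left
  intro c _
  show (c, dA.getD c 0) = (c, pvZeroMax (groups.getD c []))
  rw [hdA, hgroups, pv_getD_foldA, pv_getD_groups, PySem.Dict.getD_empty, PySem.Dict.getD_empty,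
      pv_zeroMax_eq, List.nil_append]
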